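-- pv_equiv track=rewrite | github.com/RuanPetrus/leetcode | maior_valor.py | get_maior_valor
-- ===== SOURCE A (Python) =====
-- def get_maior_valor(n: int, m: int, s: int) -> int:
--     for i in range(m, n - 1, -1):
--         number = str(i)
--         sum = 0
--
--         for digit in number:
--             sum += int(digit)
--
--         if sum == s:
--             return i
--
--     return -1
-- ===== SOURCE B (Python) =====
-- def get_maior_valor(n: int, m: int, s: int) -> int:
--     # Forward scan keeping the last (= largest) match; digit sum by arithmetic
--     # instead of string conversion. Same result as the backward early-exit scan
--     # wherever that one returns.
--     best = -1
--     for i in range(n, m + 1):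
--         t = i
--         acc = 0
--         while t > 0:
--             acc += t % 10
--             t //= 10
--         if acc == s:
--             best = i
--     return best
-- ===== Notes on version B (the rewrite author's own statement) =====
-- stated objective: alternative
-- what changed: B scans the range upward keeping the last match (instead of downward with an early return) and computes the digit sum arithmetically with % and // instead of converting each number to a string and parsing every character back.
import Mathlib
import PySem

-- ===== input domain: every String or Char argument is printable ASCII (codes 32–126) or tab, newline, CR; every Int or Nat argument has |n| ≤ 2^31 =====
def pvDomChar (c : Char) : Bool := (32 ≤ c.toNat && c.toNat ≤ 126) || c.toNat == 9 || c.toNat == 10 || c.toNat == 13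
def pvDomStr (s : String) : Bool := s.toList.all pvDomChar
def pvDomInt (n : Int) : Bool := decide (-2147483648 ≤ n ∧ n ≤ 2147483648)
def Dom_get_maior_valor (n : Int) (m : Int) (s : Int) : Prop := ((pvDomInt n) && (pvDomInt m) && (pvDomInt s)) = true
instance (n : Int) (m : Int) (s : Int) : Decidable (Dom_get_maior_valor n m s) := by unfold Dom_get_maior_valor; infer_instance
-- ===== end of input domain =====

-- B scans the range upward keeping the last (= largest) match and computes the digit
-- sum arithmetically instead of via string conversion (objective: alternative).

-- ===== PORT A =====
-- inner loop 'for digit in number: sum += int(digit)'; int(digit) is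
-- PySem.Int.ofChars? on the one-character string; the total .getD 0 form is used
-- only under Pre_, where every i the scan reaches before returning is nonnegative,
-- so every digit is '0'..'9'.
def pvStrSum (number : List Char) : Int :=
  number.foldl (fun acc digit => acc + (PySem.Int.ofChars? [digit]).getD 0) 0

def pvScanA (s : Int) : List Int → Int
  | [] => -1
  | i :: rest => if pvStrSum (PySem.Int.toChars i) = s then i else pvScanA s rest

def get_maior_valor (n : Int) (m : Int) (s : Int) : Int :=
  pvScanA s (PySem.List.pyRange m (n - 1) (-1))

-- ===== PORT B =====
-- 'while t > 0: acc += t % 10; t //= 10'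
def pvDigSum (t : Int) : Int :=
  if _h : 0 < t then PySem.Int.mod t 10 + pvDigSum (PySem.Int.floordiv t 10) else 0
termination_by t.toNat
decreasing_by
  rw [PySem.Int.floordiv_eq_ediv_of_pos (by norm_num)]
  omega

def get_maior_valor_alt (n : Int) (m : Int) (s : Int) : Int :=
  (PySem.List.pyRange n (m + 1) 1).foldl (fun best i => if pvDigSum i = s then i else best) (-1)

-- ===== PRECONDITION & SPEC =====
-- largest digit sum of any natural number ≤ k (fuel-structured like pvDsF)
def pvMaxDsF : Nat → Nat → Nat
  | 0, _ => 0
  | f + 1, k =>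
    if k = 0 then 0
    else max (k % 10 + pvMaxDsF f (k / 10))
             (if 0 < k / 10 then 9 + pvMaxDsF f (k / 10 - 1) else 0)

def pvMaxDs (k : Nat) : Nat := pvMaxDsF k k

-- Pre_ excludes exactly the inputs on which Python A raises ValueError: those where
-- the downward scan reaches a negative i (str(i) contains '-') before any match,
-- i.e. n < 0 with either m < 0 (and n ≤ m), or no i in [0,m] of digit sum s — the
-- latter characterised in closed form as s outside [0, max digit sum below m].
def Pre_get_maior_valor (n : Int) (m : Int) (s : Int) : Prop :=
  0 ≤ n ∨ m < n ∨ (0 ≤ m ∧ 0 ≤ s ∧ s ≤ (pvMaxDs m.toNat : Int))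
instance (n : Int) (m : Int) (s : Int) : Decidable (Pre_get_maior_valor n m s) := by
  unfold Pre_get_maior_valor; infer_instance

def pvWitness_get_maior_valor : Int × Int × Int := (-5, 10, 1)

def Spec_get_maior_valor (n : Int) (m : Int) (s : Int) (out : Int) : Prop := out = get_maior_valor_alt n m s
instance (n : Int) (m : Int) (s : Int) (out : Int) : Decidable (Spec_get_maior_valor n m s out) := by
  unfold Spec_get_maior_valor; infer_instance

-- ===== CLAIM (what is proved, stated in full; the proofs are below) =====
def Claim_equal_get_maior_valor : Prop := ∀ (n : Int) (m : Int) (s : Int), Dom_get_maior_valor n m s → Pre_get_maior_valor n m s → Spec_get_maior_valor n m s (get_maior_valor n m s)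


-- ===== LEMMAS AND PROOFS =====

-- digit sum of a natural number, fuel-structured (a proof-side helper)
def pvDsF : Nat → Nat → Nat
  | 0, _ => 0
  | f + 1, k => if k = 0 then 0 else k % 10 + pvDsF f (k / 10)

def pvDs (k : Nat) : Nat := pvDsF k k


lemma pvCharVal_digitChar (d : Nat) (h : d < 10) :
    (PySem.Int.ofChars? [Nat.digitChar d]).getD 0 = (d : Int) := by
  interval_cases d <;> decide

lemma pvDigSum_nonpos (t : Int) (h : ¬ 0 < t) : pvDigSum t = 0 := by
  rw [pvDigSum, dif_neg h]

lemma pvDigSum_natCast_pos (k : Nat) (h : 0 < k) :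
    pvDigSum (k : Int) = ((k % 10 : Nat) : Int) + pvDigSum ((k / 10 : Nat) : Int) := by
  have h1 : PySem.Int.mod (k : Int) 10 = ((k % 10 : Nat) : Int) := by
    exact_mod_cast PySem.Int.mod_natCast k 10
  have h2 : PySem.Int.floordiv (k : Int) 10 = ((k / 10 : Nat) : Int) := by
    exact_mod_cast PySem.Int.floordiv_natCast k 10
  rw [pvDigSum, dif_pos (show (0:Int) < (k : Int) by exact_mod_cast h), h1, h2]

lemma pvDsF_eq (f : Nat) : ∀ (k : Nat), k ≤ f → ((pvDsF f k : Nat) : Int) = pvDigSum (k : Int) := by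
  induction f with
  | zero =>
    intro k hk
    interval_cases k
    simp [pvDsF, pvDigSum_nonpos]
  | succ f ih =>
    intro k hk
    rcases Nat.eq_zero_or_pos k with h0 | h0
    · subst h0; simp [pvDsF, pvDigSum_nonpos]
    · rw [pvDsF, if_neg (by omega), pvDigSum_natCast_pos k h0,
          ← ih (k / 10) (by have := Nat.div_lt_self h0 (show 1 < 10 by norm_num); omega)]
      push_cast; ring

lemma pvDs_eq (k : Nat) : ((pvDs k : Nat) : Int) = pvDigSum (k : Int) :=
  pvDsF_eq k k le_rfl

lemma pvCoreSum (f : Nat) : ∀ (n : Nat) (l : List Char), n < 10 ^ f →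
    ((Nat.toDigitsCore 10 f n l).map (fun c => (PySem.Int.ofChars? [c]).getD 0)).sum
      = pvDigSum (n : Int) + (l.map (fun c => (PySem.Int.ofChars? [c]).getD 0)).sum := by
  induction f with
  | zero =>
    intro n l hn
    interval_cases n
    simp [Nat.toDigitsCore, pvDigSum_nonpos]
  | succ f ih =>
    intro n l hn
    simp only [Nat.toDigitsCore]
    by_cases h10 : n / 10 = 0
    · have hn10 : n < 10 := by omega
      rw [if_pos h10]
      simp only [List.map_cons, List.sum_cons]
      rcases Nat.eq_zero_or_pos n with h0 | h0
      · subst h0; simp [pvDigSum_nonpos, pvCharVal_digitChar 0 (by norm_num)]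
      · rw [pvDigSum_natCast_pos n h0, h10, Nat.cast_zero, pvDigSum_nonpos 0 (by norm_num),
            pvCharVal_digitChar (n % 10) (by omega)]
        push_cast; ring
    · rw [if_neg h10]
      have hlt : n / 10 < 10 ^ f := by
        have : n < 10 * 10 ^ f := by rw [← pow_succ']; exact hn
        omega
      rw [ih (n / 10) _ hlt]
      simp only [List.map_cons, List.sum_cons]
      rw [pvCharVal_digitChar (n % 10) (by omega),
          pvDigSum_natCast_pos n (by omega)]
      ring

lemma pvStrSum_eq (i : Int) (h : 0 ≤ i) :
    pvStrSum (PySem.Int.toChars i) = pvDigSum i := by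
  have hi : i = (i.toNat : Int) := by omega
  unfold pvStrSum
  rw [PySem.Int.toChars, if_neg (by omega), Nat.toDigits]
  rw [PySem.List.foldl_add]
  have hbound : i.toNat < 10 ^ (i.toNat + 1) :=
    lt_of_lt_of_le (Nat.lt_pow_self (by norm_num)) (Nat.pow_le_pow_right (by norm_num) (by omega))
  rw [pvCoreSum (i.toNat + 1) i.toNat [] hbound]
  simp [← hi]

lemma pvScan_eq (n s : Int) (hn : 0 ≤ n) : ∀ (k : Nat) (m : Int), (m + 1 - n).toNat = k →
    pvScanA s (PySem.List.pyRange m (n - 1) (-1))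
      = (PySem.List.pyRange n (m + 1) 1).foldl (fun best i => if pvDigSum i = s then i else best) (-1) := by
  intro k
  induction k with
  | zero =>
    intro m hk
    have hmn : m < n := by omega
    rw [PySem.List.pyRange_neg_one_eq_nil (by omega), PySem.List.pyRange_one_eq_nil (by omega)]
    rfl
  | succ k ih =>
    intro m hk
    by_cases hmn : n ≤ m
    · rw [PySem.List.pyRange_neg_one_cons (by omega : n - 1 < m),
          PySem.List.pyRange_one_succ_right hmn, List.foldl_append]
      simp only [List.foldl_cons, List.foldl_nil]
      have hrec : pvScanA s (PySem.List.pyRange (m - 1) (n - 1) (-1))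
          = (PySem.List.pyRange n (m - 1 + 1) 1).foldl (fun best i => if pvDigSum i = s then i else best) (-1) :=
        ih (m - 1) (by omega)
      rw [show PySem.List.pyRange n m 1 = PySem.List.pyRange n (m - 1 + 1) 1 by ring_nf]
      rw [pvScanA, pvStrSum_eq m (by omega), hrec]
    · rw [PySem.List.pyRange_neg_one_eq_nil (by omega), PySem.List.pyRange_one_eq_nil (by omega)]
      rfl

lemma pvDsF_mono (f : Nat) : ∀ (f' k : Nat), k ≤ f → k ≤ f' → pvDsF f k = pvDsF f' k := by
  induction f with
  | zero =>
    intro f' k hf hf'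
    interval_cases k
    cases f' <;> simp [pvDsF]
  | succ f ih =>
    intro f' k hf hf'
    rcases Nat.eq_zero_or_pos k with h0 | h0
    · subst h0; cases f' <;> simp [pvDsF]
    · obtain ⟨f'', rfl⟩ : ∃ f'', f' = f'' + 1 := ⟨f' - 1, by omega⟩
      have hd : k / 10 < k := Nat.div_lt_self h0 (by norm_num)
      rw [pvDsF, pvDsF, if_neg (by omega), if_neg (by omega),
          ih f'' (k / 10) (by omega) (by omega)]

lemma pvDs_rec (k : Nat) (h : k ≠ 0) : pvDs k = k % 10 + pvDs (k / 10) := by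
  have hd : k / 10 < k := Nat.div_lt_self (by omega) (by norm_num)
  unfold pvDs
  obtain ⟨f, rfl⟩ : ∃ f, k = f + 1 := ⟨k - 1, by omega⟩
  rw [pvDsF, if_neg h, pvDsF_mono f ((f + 1) / 10) ((f + 1) / 10) (by omega) le_rfl]

lemma pvDs_mul10_add (q r : Nat) (hr : r < 10) : pvDs (10 * q + r) = pvDs q + r := by
  rcases Nat.eq_zero_or_pos (10 * q + r) with h0 | h0
  · have hq : q = 0 := by omega
    have hr0 : r = 0 := by omega
    subst hq; subst hr0; rfl
  · rw [pvDs_rec _ (by omega)]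
    have h1 : (10 * q + r) % 10 = r := by omega
    have h2 : (10 * q + r) / 10 = q := by omega
    rw [h1, h2]; ring

lemma pvDs_step (k : Nat) : pvDs (k + 1) ≤ pvDs k + 1 := by
  induction k using Nat.strong_induction_on with
  | _ k ih =>
    rcases Nat.eq_zero_or_pos k with h0 | h0
    · subst h0; simp [pvDs, pvDsF]
    · by_cases h9 : k % 10 = 9
      · have hk1 : k + 1 = 10 * (k / 10 + 1) + 0 := by omega
        have hk : k = 10 * (k / 10) + 9 := by omega
        have hlt : k / 10 < k := Nat.div_lt_self h0 (by norm_num)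
        have h1 : pvDs (k + 1) = pvDs (k / 10 + 1) := by
          rw [hk1, pvDs_mul10_add _ 0 (by norm_num)]
          ring
        have h2 : pvDs k = pvDs (k / 10) + 9 := by
          conv_lhs => rw [hk]
          exact pvDs_mul10_add _ 9 (by norm_num)
        have h3 := ih (k / 10) hlt
        omega
      · have hk1 : k + 1 = 10 * (k / 10) + (k % 10 + 1) := by omega
        have hk : k = 10 * (k / 10) + k % 10 := by omega
        have h1 : pvDs (k + 1) = pvDs (k / 10) + (k % 10 + 1) := by
          rw [hk1]; exact pvDs_mul10_add _ _ (by omega)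
        have h2 : pvDs k = pvDs (k / 10) + k % 10 := by
          conv_lhs => rw [hk]
          exact pvDs_mul10_add _ _ (by omega)
        omega

-- discrete intermediate value: every value up to pvDs K is a digit sum below K
lemma pvDs_ivt (K : Nat) : ∀ (s : Nat), s ≤ pvDs K → ∃ k, k ≤ K ∧ pvDs k = s := by
  induction K with
  | zero =>
    intro s hs
    have : pvDs 0 = 0 := rfl
    exact ⟨0, le_rfl, by omega⟩
  | succ K ih =>
    intro s hs
    by_cases h : s ≤ pvDs K
    · obtain ⟨k, hk, hke⟩ := ih s h
      exact ⟨k, by omega, hke⟩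
    · have hstep := pvDs_step K
      exact ⟨K + 1, le_rfl, by omega⟩

-- the maximum digit sum below k is achieved by some j ≤ k
lemma pvMaxDsF_achieved (f : Nat) : ∀ (k : Nat), k ≤ f → ∃ j, j ≤ k ∧ pvDs j = pvMaxDsF f k := by
  induction f with
  | zero =>
    intro k hk
    interval_cases k
    exact ⟨0, le_rfl, rfl⟩
  | succ f ih =>
    intro k hk
    rcases Nat.eq_zero_or_pos k with h0 | h0
    · subst h0
      exact ⟨0, le_rfl, by simp [pvMaxDsF]; rfl⟩
    · have hlt : k / 10 < k := Nat.div_lt_self h0 (by norm_num)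
      obtain ⟨j1, hj1, he1⟩ := ih (k / 10) (by omega)
      rw [pvMaxDsF, if_neg (by omega)]
      by_cases hq : 0 < k / 10
      · obtain ⟨j2, hj2, he2⟩ := ih (k / 10 - 1) (by omega)
        rw [if_pos hq]
        rcases Nat.le_total (k % 10 + pvMaxDsF f (k / 10)) (9 + pvMaxDsF f (k / 10 - 1)) with hmx | hmx
        · rw [Nat.max_eq_right hmx]
          refine ⟨10 * j2 + 9, by omega, ?_⟩
          rw [pvDs_mul10_add j2 9 (by norm_num), he2]; ring
        · rw [Nat.max_eq_left hmx]
          refine ⟨10 * j1 + k % 10, by omega, ?_⟩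
          rw [pvDs_mul10_add j1 (k % 10) (by omega), he1]; ring
      · rw [if_neg hq, Nat.max_eq_left (by omega)]
        refine ⟨10 * j1 + k % 10, by omega, ?_⟩
        rw [pvDs_mul10_add j1 (k % 10) (by omega), he1]; ring

lemma pvMaxDs_achieved (k : Nat) : ∃ j, j ≤ k ∧ pvDs j = pvMaxDs k :=
  pvMaxDsF_achieved k k le_rfl

-- the downward scan stops at a nonnegative match, so the part of the range below 0 is dead
lemma pvScanStop (s : Int) : ∀ (j : Nat) (m n : Int), 0 ≤ m → m.toNat = j → n < 0 →
    (∃ k, k ≤ m.toNat ∧ (pvDs k : Int) = s) →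
    pvScanA s (PySem.List.pyRange m (n - 1) (-1))
      = pvScanA s (PySem.List.pyRange m (-1) (-1)) := by
  intro j
  induction j with
  | zero =>
    intro m n hm hj hn hex
    have hm0 : m = 0 := by omega
    subst hm0
    obtain ⟨k, hk, hks⟩ := hex
    have hk0 : k = 0 := by omega
    subst hk0
    have hs : s = 0 := by simpa [pvDs, pvDsF] using hks.symm
    rw [PySem.List.pyRange_neg_one_cons (show n - 1 < 0 by omega),
        PySem.List.pyRange_neg_one_cons (show (-1:Int) < 0 by norm_num)]
    rw [pvScanA, pvScanA, pvStrSum_eq 0 le_rfl, pvDigSum_nonpos 0 (by norm_num), hs]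
    norm_num
  | succ j ih =>
    intro m n hm hj hn hex
    have hmpos : 0 < m := by omega
    rw [PySem.List.pyRange_neg_one_cons (show n - 1 < m by omega),
        PySem.List.pyRange_neg_one_cons (show (-1:Int) < m by omega)]
    rw [pvScanA, pvScanA]
    by_cases hcond : pvStrSum (PySem.Int.toChars m) = s
    · rw [if_pos hcond, if_pos hcond]
    · rw [if_neg hcond, if_neg hcond]
      apply ih (m - 1) n (by omega) (by omega) hn
      obtain ⟨k, hk, hks⟩ := hex
      refine ⟨k, ?_, hks⟩
      rcases Nat.lt_or_ge k (m.toNat) with h | h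
      · omega
      · exfalso
        have hkm : k = m.toNat := by omega
        apply hcond
        rw [pvStrSum_eq m hm, show m = ((m.toNat : Nat) : Int) by omega, ← pvDs_eq, ← hkm, hks]

-- for n < 0 the prefix of B's forward fold over the negatives leaves the accumulator at -1
lemma pvNegFold (s : Int) : ∀ (j : Nat) (n acc : Int), n < 0 → (0 - n).toNat = j →
    (PySem.List.pyRange n 0 1).foldl (fun best i => if pvDigSum i = s then i else best) acc
      = if (0:Int) = s then -1 else acc := by
  intro j
  induction j with
  | zero => intro n acc hn hj; omega
  | succ j ih =>
    intro n acc hn hj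
    rw [PySem.List.pyRange_one_cons (show n < 0 from hn)]
    simp only [List.foldl_cons]
    rw [pvDigSum_nonpos n (by omega)]
    by_cases hn1 : n + 1 < 0
    · rw [ih (n + 1) _ hn1 (by omega)]
      split_ifs <;> rfl
    · have hne : n = -1 := by omega
      subst hne
      rw [PySem.List.pyRange_one_eq_nil (by norm_num)]
      rfl

-- ===== VERDICT (by name: the statements are the Claim_ definitions above) =====
theorem get_maior_valor_spec : Claim_equal_get_maior_valor := by
  intro n m s _ hpre
  unfold Spec_get_maior_valor get_maior_valor get_maior_valor_alt
  by_cases h0n : 0 ≤ n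
  · exact pvScan_eq n s h0n (m + 1 - n).toNat m rfl
  · by_cases hmn : m < n
    · rw [PySem.List.pyRange_neg_one_eq_nil (by omega), PySem.List.pyRange_one_eq_nil (by omega)]
      rfl
    · have hn : n < 0 := by omega
      obtain ⟨hm, hs0, hsle⟩ : 0 ≤ m ∧ 0 ≤ s ∧ s ≤ (pvMaxDs m.toNat : Int) := by
        rcases hpre with h | h | h
        · omega
        · omega
        · exact h
      have hex : ∃ k, k ≤ m.toNat ∧ (pvDs k : Int) = s := by
        obtain ⟨j, hj, hje⟩ := pvMaxDs_achieved m.toNat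
        obtain ⟨k, hk, hke⟩ := pvDs_ivt j s.toNat (by rw [hje]; omega)
        exact ⟨k, le_trans hk hj, by rw [hke]; omega⟩
      rw [pvScanStop s m.toNat m n hm rfl hn hex]
      have hA := pvScan_eq 0 s le_rfl (m + 1 - 0).toNat m rfl
      rw [show (0:Int) - 1 = -1 by norm_num] at hA
      rw [hA]
      rw [PySem.List.pyRange_one_append n 0 (m + 1) (by omega) (by omega), List.foldl_append]
      have hneg := pvNegFold s (0 - n).toNat n (-1) hn rfl
      rw [hneg]
      split_ifs <;> rfl
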